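-- pv_equiv track=rewrite | github.com/DrNjitram/AoC2023 | d07.py | get_strength2
-- ===== SOURCE A (Python) =====
-- def get_strength2(hand: list) -> int:
--     hand, bet = hand
--     strength_string = ""
--
--     unique = list(set(hand))
--     match len(unique):
--         case 1:  # Five of a kind
--             strength_string += "7"
--         case 2:  # Four of a kind or Full House
--             if 'J' in unique:
--                 strength_string += "7"
--             elif any(hand.count(c) == 4 for c in unique):
--                 strength_string += "6"  # Four of a kind
--             else:
--                 strength_string += "5"  # Full House
--         case 3:  # Three of a kind or 2 pair
--             if any(hand.count(c) == 3 for c in unique):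
--                 if 'J' in unique:  # Four of a kind
--                     strength_string += "6"
--                 else:  # Three of a kind
--                     strength_string += "4"
--             else:
--                 if hand.count("J") == 2:  # Four of a kind JJAAB
--                     strength_string += "6"
--                 elif hand.count("J") == 1:  # Full House AABBJ
--                     strength_string += "5"
--                 else:  # Two pair
--                     strength_string += "3"
--         case 4:  # One pair
--             if "J" in unique:  # Three of a kind AABCJ or JJABC -> AAABC
--                 strength_string += "4"
--             else:
--                 strength_string += "2"
--         case 5:
--             if 'J' in unique:
--                 strength_string += "2"
--             else:
--                 strength_string += "1"
--
--     for c in hand: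
--         strength_string += "14" if c == 'A' else "13" if c == "K" else "12" if c == "Q" else "01" if c == "J" else "10" if c == "T" else '0' + c
--
--     return int(strength_string)
-- ===== SOURCE B (Python) =====
-- def get_strength2(hand: list) -> int:
--     hand, bet = hand
--
--     runs = []   # run lengths of equal cards in the sorted hand = the card multiplicities
--     j = 0       # number of jokers
--     prev = None
--     for c in sorted(hand):
--         if c == prev:
--             runs[-1] += 1
--         else:
--             runs.append(1)
--             prev = c
--         if c == 'J':
--             j += 1
--
--     match len(runs), j > 0:
--         case (1, _): strength_string = "7"
--         case (2, True): strength_string = "7"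
--         case (2, False): strength_string = "6" if 4 in runs else "5"
--         case (3, True): strength_string = "6" if 3 in runs or j == 2 else ("5" if j == 1 else "3")
--         case (3, False): strength_string = "4" if 3 in runs else "3"
--         case (4, jm): strength_string = "4" if jm else "2"
--         case (5, jm): strength_string = "2" if jm else "1"
--         case _: strength_string = ""
--
--     for c in hand:
--         strength_string += "14" if c == 'A' else "13" if c == "K" else "12" if c == "Q" else "01" if c == "J" else "10" if c == "T" else '0' + c
--
--     return int(strength_string)
-- ===== Notes on version B (the rewrite author's own statement) =====
-- stated objective: alternative
-- what changed: Replaces A's set(hand) plus repeated hand.count() scans and match on len(set) by sorting the hand and scanning it once for run lengths (the multiplicities) while tallying jokers, then deciding the type digit by a match on the (number of runs, jokers present) pair; the final per-card formatting loop is kept as in A.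
-- outside the precondition, e.g. on get_strength2(['A_111', '0']): A returns 4140010101, B returns 4140010101; on get_strength2(['1 ', '0']): A returns 5010, B returns 5010
import Mathlib
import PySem

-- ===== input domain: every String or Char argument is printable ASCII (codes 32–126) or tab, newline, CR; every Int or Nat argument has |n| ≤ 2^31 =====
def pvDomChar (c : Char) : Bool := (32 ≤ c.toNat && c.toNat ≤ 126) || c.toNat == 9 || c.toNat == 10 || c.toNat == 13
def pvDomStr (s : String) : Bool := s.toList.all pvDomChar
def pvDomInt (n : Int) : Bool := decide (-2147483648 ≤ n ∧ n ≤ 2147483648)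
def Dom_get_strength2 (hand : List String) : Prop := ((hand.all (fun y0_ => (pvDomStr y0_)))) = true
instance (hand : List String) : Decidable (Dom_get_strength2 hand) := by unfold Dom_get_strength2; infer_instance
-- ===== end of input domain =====

-- B replaces A's set + repeated-.count classification by sorting the hand and scanning it once
-- for run lengths (no set/dict, no rescans), with the type decision keyed on (runs, jokers);
-- return value proved equal wherever A returns.


-- ===== PORT A =====
-- the per-card code of the final formatting loop (textually the same chain in A and in B)
def pvCode (c : Char) : List Char :=
  if c = 'A' then ['1','4'] else if c = 'K' then ['1','3'] else if c = 'Q' then ['1','2']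
  else if c = 'J' then ['0','1'] else if c = 'T' then ['1','0'] else ['0', c]

-- A's hand-type digit: match on len(unique) with joker sub-branches
def pvTypeA (hd : List Char) : List Char :=
  let unique : PySem.Set Char := PySem.Set.ofList hd
  if unique.length = 1 then ['7']
  else if unique.length = 2 then
    (if PySem.Set.contains unique 'J' then ['7']
     else if unique.any (fun c => hd.count c == 4) then ['6'] else ['5'])
  else if unique.length = 3 then
    (if unique.any (fun c => hd.count c == 3) then
       (if PySem.Set.contains unique 'J' then ['6'] else ['4'])
     else if hd.count 'J' = 2 then ['6']
     else if hd.count 'J' = 1 then ['5'] else ['3'])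
  else if unique.length = 4 then (if PySem.Set.contains unique 'J' then ['4'] else ['2'])
  else if unique.length = 5 then (if PySem.Set.contains unique 'J' then ['2'] else ['1'])
  else []  -- no case of the match fires: strength_string stays empty

def get_strength2 (hand : List String) : Int :=
  match hand with
  | [cards, _bet] =>  -- 'hand, bet = hand'
    let hd := cards.toList
    (PySem.Int.ofChars? (hd.foldl (fun acc c => acc ++ pvCode c) (pvTypeA hd))).getD 0
      -- int(strength_string); inputs on which it raises are outside Pre_
  | _ => 0  -- unpacking raises unless len(hand) == 2 (excluded by Pre_)

-- ===== PORT B =====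
-- Source B's loop over the sorted hand: run lengths of equal cards plus the joker count.
-- The runs list is kept head-first (Python appends at the tail and bumps runs[-1]);
-- it is reversed into Python's order where the loop ends.
def pvRunsGo : List Char → Option Char → List Nat → Nat → (List Nat × Nat)
  | [], _, runs, j => (runs, j)
  | c :: t, prev, runs, j =>
      pvRunsGo t (some c)
        (if prev = some c then (match runs with | r :: rest => (r+1) :: rest | [] => [1])
         else 1 :: runs)
        (if c = 'J' then j + 1 else j)

-- B's hand-type digit: match (len(runs), j > 0) with the guarded cases of Source B
def pvTypeB (hd : List Char) : List Char :=
  let s := PySem.List.sorted hd (fun c => c) false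
  let p := pvRunsGo s none [] 0
  let runs := p.1.reverse
  let j := p.2
  if runs.length = 1 then ['7']
  else if runs.length = 2 then
    (if 0 < j then ['7'] else if runs.contains 4 then ['6'] else ['5'])
  else if runs.length = 3 then
    (if 0 < j then
       (if runs.contains 3 || decide (j = 2) then ['6'] else if j = 1 then ['5'] else ['3'])
     else (if runs.contains 3 then ['4'] else ['3']))
  else if runs.length = 4 then (if 0 < j then ['4'] else ['2'])
  else if runs.length = 5 then (if 0 < j then ['2'] else ['1'])
  else []

def get_strength2_alt (hand : List String) : Int :=
  if hand.length = 2 then  -- 'hand, bet = hand' raises unless len(hand) == 2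
    let hd := (hand.headD "").toList
    (PySem.Int.ofChars? (hd.foldl (fun acc c => acc ++ pvCode c) (pvTypeB hd))).getD 0
  else 0

-- ===== PRECONDITION & SPEC =====
def pvValidCard (c : Char) : Bool :=
  c.isDigit || c == 'T' || c == 'J' || c == 'Q' || c == 'K' || c == 'A'

-- Pre_: a [cards, bet] pair (unpacking raises otherwise) with a nonempty cards string over
-- '0'-'9','T','J','Q','K','A'. On other characters the final int(strength_string) raises
-- ValueError, except rare corners (an underscore or trailing whitespace falling where int()
-- tolerates it) on which A returns and B returns the same value.
def Pre_get_strength2 (hand : List String) : Prop :=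
  hand.length = 2 ∧ (hand.headD "").toList ≠ [] ∧
    (hand.headD "").toList.all pvValidCard = true
instance (hand : List String) : Decidable (Pre_get_strength2 hand) := by
  unfold Pre_get_strength2; infer_instance

def pvWitness_get_strength2 : List String := ["T55J5", "684"]

def Spec_get_strength2 (hand : List String) (out : Int) : Prop := out = get_strength2_alt hand
instance (hand : List String) (out : Int) : Decidable (Spec_get_strength2 hand out) := by
  unfold Spec_get_strength2; infer_instance

-- ===== CLAIM (what is proved, stated in full; the proofs are below) =====
def Claim_equal_get_strength2 : Prop := ∀ (hand : List String), Dom_get_strength2 hand → Pre_get_strength2 hand → Spec_get_strength2 hand (get_strength2 hand)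

-- ===== LEMMAS AND PROOFS =====

-- the multiplicities of a list's distinct elements, in first-occurrence order
def pvCnts : List Char → List Nat
  | [] => []
  | a :: t => (1 + t.count a) :: pvCnts (t.filter (fun x => !(x == a)))
  termination_by l => l.length
  decreasing_by
    simpa using Nat.lt_succ_of_le (le_trans (List.length_filter_le _ _) (by simp))

-- the second component of the loop state counts the jokers seen
theorem pv_go_j (s : List Char) : ∀ (prev : Option Char) (runs : List Nat) (j : Nat),
    (pvRunsGo s prev runs j).2 = j + s.count 'J' := by
  induction s with
  | nil => intro _ _ _; simp [pvRunsGo]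
  | cons c t ih =>
    intro prev runs j
    simp only [pvRunsGo]
    rw [ih, List.count_cons]
    by_cases h : c = 'J'
    · simp [h]; omega
    · simp [h]


-- mid-run invariant of the loop: with current card c and current run length r, the final runs
-- are (up to order) the runs emitted so far, the current run extended by c's multiplicity,
-- and the multiplicities of the remaining cards
theorem pv_go_spec (s : List Char) : ∀ (c : Char) (r : Nat) (rs : List Nat) (j : Nat),
    s.Pairwise (· ≤ ·) → (∀ x ∈ s, c ≤ x) →
    (pvRunsGo s (some c) (r :: rs) j).1.Perm
      (rs ++ (r + s.count c) :: pvCnts (s.filter (fun x => !(x == c)))) := by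
  induction s with
  | nil =>
    intro c r rs j _ _
    simpa [pvRunsGo, pvCnts] using (List.perm_append_singleton r rs).symm
  | cons a t ih =>
    intro c r rs j hsort hge
    have hst : t.Pairwise (· ≤ ·) := (List.pairwise_cons.mp hsort).2
    have hat : ∀ x ∈ t, a ≤ x := (List.pairwise_cons.mp hsort).1
    by_cases hca : c = a
    · subst hca
      have hct : ∀ x ∈ t, c ≤ x := fun x hx => hge x (by simp [hx])
      simp only [pvRunsGo, List.count_cons_self,
        List.filter_cons, beq_self_eq_true, Bool.not_true]
      have H := ih c (r + 1) rs (if c = 'J' then j + 1 else j) hst hct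
      have harith : r + (t.count c + 1) = r + 1 + t.count c := by omega
      simpa [harith] using H
    · have hclt : c < a := lt_of_le_of_ne (hge a (by simp)) hca
      have hnc : ∀ x ∈ a :: t, x ≠ c := by
        intro x hx
        rcases List.mem_cons.mp hx with rfl | hx'
        · exact fun h => hca h.symm
        · exact (lt_of_lt_of_le hclt (hat x hx')).ne'
      have hcount : (a :: t).count c = 0 := List.count_eq_zero.mpr (fun h => hnc c h rfl)
      have hfilter : (a :: t).filter (fun x => !(x == c)) = a :: t :=
        List.filter_eq_self.mpr (fun x hx => by simp [hnc x hx])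
      simp only [pvRunsGo, if_neg (show ¬ (some c = some a) by simpa using hca)]
      have H := ih a 1 (r :: rs) (if a = 'J' then j + 1 else j) hst hat
      rw [hcount, hfilter]
      have hcnts : pvCnts (a :: t)
          = (1 + t.count a) :: pvCnts (t.filter (fun x => !(x == a))) := by
        simp [pvCnts]
      rw [hcnts]
      refine H.trans ?_
      simpa using (List.perm_middle
        (a := r) (l₁ := rs)
        (l₂ := (1 + t.count a) :: pvCnts (t.filter (fun x => !(x == a))))).symm

theorem pv_go_runs (s : List Char) (hsort : s.Pairwise (· ≤ ·)) :
    (pvRunsGo s none [] 0).1.Perm (pvCnts s) := by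
  match s, hsort with
  | [], _ => simp [pvRunsGo, pvCnts]
  | a :: t, hsort =>
    have hst : t.Pairwise (· ≤ ·) := (List.pairwise_cons.mp hsort).2
    have hat : ∀ x ∈ t, a ≤ x := (List.pairwise_cons.mp hsort).1
    simp only [pvRunsGo, if_neg (show ¬ ((none : Option Char) = some a) by simp)]
    have H := pv_go_spec t a 1 [] (if a = 'J' then 1 else 0) hst hat
    have hcnts : pvCnts (a :: t)
        = (1 + t.count a) :: pvCnts (t.filter (fun x => !(x == a))) := by
      simp [pvCnts]
    rw [hcnts]
    simpa using H

-- pvCnts is, up to order, the count of each distinct element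
theorem pv_cnts_perm (l : List Char) :
    (pvCnts l).Perm ((PySem.Set.ofList l).map (fun c => l.count c)) := by
  suffices H : ∀ (n : Nat) (l : List Char), l.length ≤ n →
      (pvCnts l).Perm ((PySem.Set.ofList l).map (fun c => l.count c)) from H l.length l le_rfl
  intro n
  induction n with
  | zero =>
    intro l hl
    have : l = [] := List.eq_nil_of_length_eq_zero (Nat.le_zero.mp hl)
    subst this
    simp [pvCnts]
  | succ n ihn =>
    intro l hl
    match l with
    | [] => simp [pvCnts]
    | a :: t =>
      have hlen : (t.filter (fun x => !(x == a))).length ≤ n :=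
        le_trans (List.length_filter_le _ _) (by simpa using Nat.lt_succ_iff.mp hl)
      have IH := ihn (t.filter (fun x => !(x == a))) hlen
      have hcnts : pvCnts (a :: t)
          = (1 + t.count a) :: pvCnts (t.filter (fun x => !(x == a))) := by
        simp [pvCnts]
      have hnotmem : a ∉ PySem.Set.ofList (t.filter (fun x => !(x == a))) := by
        intro h
        have := List.mem_filter.mp ((PySem.Set.mem_ofList _ _).mp h)
        simp at this
      have hset : (PySem.Set.ofList (a :: t)).Perm
          (a :: PySem.Set.ofList (t.filter (fun x => !(x == a)))) := by
        refine (List.perm_ext_iff_of_nodup (PySem.Set.nodup_ofList _)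
          (List.nodup_cons.mpr ⟨hnotmem, PySem.Set.nodup_ofList _⟩)).mpr ?_
        intro x
        simp only [PySem.Set.mem_ofList, List.mem_cons, List.mem_filter,
          Bool.not_eq_eq_eq_not, Bool.not_true, beq_eq_false_iff_ne, ne_eq]
        by_cases hx : x = a <;> simp [hx]
      have hmap := hset.map (fun c => (a :: t).count c)
      have hcongr : (PySem.Set.ofList (t.filter (fun x => !(x == a)))).map
            (fun c => (a :: t).count c)
          = (PySem.Set.ofList (t.filter (fun x => !(x == a)))).map
            (fun c => (t.filter (fun x => !(x == a))).count c) := by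
        apply List.map_congr_left
        intro x hx
        have hxt' := (PySem.Set.mem_ofList _ _).mp hx
        have hxa : ¬ x = a := by
          have := List.mem_filter.mp hxt'
          simp at this
          exact this.2
        rw [List.count_cons_of_ne (fun h => hxa h.symm),
          List.count_filter (by simp [hxa])]
      rw [hcnts]
      refine List.Perm.trans ?_ hmap.symm
      simp only [List.map_cons, List.count_cons_self, hcongr]
      have : 1 + t.count a = t.count a + 1 := by omega
      rw [this]
      exact List.Perm.cons _ IH

-- A's branch tree and Source B's (len(runs), j > 0) match agree for every statistics vector
theorem pv_tree (u : Nat) (e4 e3 : Bool) (jc : Nat) :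
    (if u = 1 then ['7']
     else if u = 2 then
       (if decide (jc ≠ 0) then ['7'] else if e4 then ['6'] else ['5'])
     else if u = 3 then
       (if e3 then (if decide (jc ≠ 0) then ['6'] else ['4'])
        else if jc = 2 then ['6'] else if jc = 1 then ['5'] else ['3'])
     else if u = 4 then (if decide (jc ≠ 0) then ['4'] else ['2'])
     else if u = 5 then (if decide (jc ≠ 0) then ['2'] else ['1'])
     else ([] : List Char))
    = (if u = 1 then ['7']
       else if u = 2 then (if 0 < jc then ['7'] else if e4 then ['6'] else ['5'])
       else if u = 3 then
         (if 0 < jc then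
            (if e3 || decide (jc = 2) then ['6'] else if jc = 1 then ['5'] else ['3'])
          else (if e3 then ['4'] else ['3']))
       else if u = 4 then (if 0 < jc then ['4'] else ['2'])
       else if u = 5 then (if 0 < jc then ['2'] else ['1'])
       else []) := by
  rcases e3 <;> rcases e4 <;> split_ifs <;> first | rfl | omega | simp_all

-- the bridge: the two type digits agree on every hand
theorem pvType_eq (hd : List Char) : pvTypeA hd = pvTypeB hd := by
  have hndS : (PySem.Set.ofList hd).Nodup := PySem.Set.nodup_ofList hd
  set S := PySem.Set.ofList hd with hS
  set s := PySem.List.sorted hd (fun c => c) false with hs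
  set p := pvRunsGo s none [] 0 with hp
  set runs := p.1.reverse with hruns0
  have hsp : s.Perm hd := PySem.List.sorted_perm hd _ false
  have hsort : s.Pairwise (· ≤ ·) := by
    simpa using PySem.List.sorted_pairwise hd (fun c => c)
  have hperm : runs.Perm (S.map (fun c => hd.count c)) := by
    have h1 : runs.Perm (pvCnts s) := (List.reverse_perm p.1).trans (pv_go_runs s hsort)
    have h2 := pv_cnts_perm s
    have h3 : (PySem.Set.ofList s).map (fun c => s.count c)
        = (PySem.Set.ofList s).map (fun c => hd.count c) :=
      List.map_congr_left (fun x _ => hsp.count_eq x)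
    have h4 : (PySem.Set.ofList s).Perm S := by
      refine (List.perm_ext_iff_of_nodup (PySem.Set.nodup_ofList _) hndS).mpr ?_
      intro x
      rw [PySem.Set.mem_ofList, hS, PySem.Set.mem_ofList, hsp.mem_iff]
    exact h1.trans (h2.trans (by rw [h3]; exact h4.map _))
  have hj : p.2 = hd.count 'J' := by
    rw [hp, pv_go_j]
    simpa using hsp.count_eq 'J'
  have hlen : runs.length = S.length := by rw [hperm.length_eq, List.length_map]
  have hc : ∀ m : Nat, runs.contains m = S.any (fun c => hd.count c == m) := by
    intro m
    rw [Bool.eq_iff_iff]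
    simp only [List.contains_iff_mem, List.any_eq_true, beq_iff_eq]
    rw [hperm.mem_iff]
    simp only [List.mem_map]
  have hJ : PySem.Set.contains S 'J' = decide (hd.count 'J' ≠ 0) := by
    rw [PySem.Set.contains_eq_listContains, Bool.eq_iff_iff]
    simp only [List.contains_iff_mem, decide_eq_true_eq]
    have hm : ('J' ∈ S) ↔ 0 < hd.count 'J' := by
      rw [hS, PySem.Set.mem_ofList]
      exact List.count_pos_iff.symm
    rw [hm]
    omega
  have hA : pvTypeA hd
      = (if S.length = 1 then ['7']
         else if S.length = 2 then
           (if PySem.Set.contains S 'J' then ['7']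
            else if S.any (fun c => hd.count c == 4) then ['6'] else ['5'])
         else if S.length = 3 then
           (if S.any (fun c => hd.count c == 3) then
              (if PySem.Set.contains S 'J' then ['6'] else ['4'])
            else if hd.count 'J' = 2 then ['6']
            else if hd.count 'J' = 1 then ['5'] else ['3'])
         else if S.length = 4 then (if PySem.Set.contains S 'J' then ['4'] else ['2'])
         else if S.length = 5 then (if PySem.Set.contains S 'J' then ['2'] else ['1'])
         else []) := rfl
  have hB : pvTypeB hd
      = (if runs.length = 1 then ['7']
         else if runs.length = 2 then
           (if 0 < p.2 then ['7'] else if runs.contains 4 then ['6'] else ['5'])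
         else if runs.length = 3 then
           (if 0 < p.2 then
              (if runs.contains 3 || decide (p.2 = 2) then ['6']
               else if p.2 = 1 then ['5'] else ['3'])
            else (if runs.contains 3 then ['4'] else ['3']))
         else if runs.length = 4 then (if 0 < p.2 then ['4'] else ['2'])
         else if runs.length = 5 then (if 0 < p.2 then ['2'] else ['1'])
         else []) := rfl
  rw [hA, hB, hJ, hlen, hc 4, hc 3, hj]
  exact pv_tree S.length (S.any fun c => hd.count c == 4)
    (S.any fun c => hd.count c == 3) (hd.count 'J')

-- ===== VERDICT (by name: the statement is the Claim_ definition above) =====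
theorem get_strength2_spec : Claim_equal_get_strength2 := by
  intro hand _ hPre
  obtain ⟨h2, _, _⟩ := hPre
  unfold Spec_get_strength2
  match hand, h2 with
  | [cards, bet], _ =>
    simp only [get_strength2, get_strength2_alt, List.length_cons, List.length_nil,
      List.headD_cons]
    rw [pvType_eq cards.toList]
    simp
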